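-- pv_equiv track=rewrite | github.com/tushancse04/MLCNN | TUDarmstadt/cnn.py | possible_atoms
-- ===== SOURCE A (Python) =====
-- def possible_atoms(pred_doms,dom_sizes_map):
-- 	if len(pred_doms) == 1:
-- 		d = pred_doms[0]
-- 		objs = []
-- 		s = int(dom_sizes_map[d])
-- 		for i in range(s):
-- 			objs += [[str(d) + '_' +str(i)]]
-- 		return objs
--
-- 	d1,d2 = pred_doms[0],pred_doms[1]
-- 	s1,s2 = int(dom_sizes_map[d1]),int(dom_sizes_map[d2])
-- 	objs = []
-- 	d1,d2 = str(d1),str(d2)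
-- 	for i in range(s1):
-- 		for j in range(s2):
-- 			objs.append([d1 + '_' + str(i),d2 + '_' + str(j)])
-- 	return objs
-- ===== SOURCE B (Python) =====
-- def possible_atoms(pred_doms, dom_sizes_map):
--     # Rank-indexed enumeration: a single flat loop over the product size, with
--     # divmod turning the rank k back into the (i, j) pair.
--     d = str(pred_doms[0])
--     s = int(dom_sizes_map[pred_doms[0]])
--     if len(pred_doms) == 1:
--         return [['%s_%d' % (d, k)] for k in range(s)]
--     d2 = str(pred_doms[1])
--     s2 = int(dom_sizes_map[pred_doms[1]])
--     if s <= 0 or s2 <= 0: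
--         return []
--     return [['%s_%d' % (d, k // s2), '%s_%d' % (d2, k % s2)] for k in range(s * s2)]
-- ===== Notes on version B (the rewrite author's own statement) =====
-- stated objective: alternative
-- what changed: B replaces A's nested i/j accumulator loops by a rank-indexed enumeration: one flat pass over range(s1*s2) that recovers the pair via k//s2 and k%s2 (one-domain case is a single direct comprehension).
import Mathlib
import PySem

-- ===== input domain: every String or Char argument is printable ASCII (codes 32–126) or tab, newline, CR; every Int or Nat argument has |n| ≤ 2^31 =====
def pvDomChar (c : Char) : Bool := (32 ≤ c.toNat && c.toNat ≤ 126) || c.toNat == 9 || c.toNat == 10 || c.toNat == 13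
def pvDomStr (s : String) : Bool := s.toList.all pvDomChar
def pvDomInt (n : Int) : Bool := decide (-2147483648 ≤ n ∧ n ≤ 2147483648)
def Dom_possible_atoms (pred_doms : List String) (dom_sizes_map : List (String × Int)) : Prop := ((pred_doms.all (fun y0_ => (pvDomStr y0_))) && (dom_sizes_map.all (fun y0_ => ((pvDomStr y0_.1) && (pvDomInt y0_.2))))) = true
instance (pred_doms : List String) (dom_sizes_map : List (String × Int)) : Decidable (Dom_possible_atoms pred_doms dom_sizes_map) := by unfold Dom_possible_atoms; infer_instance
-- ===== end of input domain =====

-- B enumerates the two-domain atoms by rank: one flat loop over range(s1*s2) recovering the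
-- pair from k//s2 and k%s2, instead of A's nested accumulator loops; return value only.

-- ===== PORT A =====
-- literal transliteration of A: accumulator loops appending one atom at a time
def possible_atoms (pred_doms : List String) (dom_sizes_map : List (String × Int)) : List (List String) :=
  if pred_doms.length = 1 then
    match PySem.List.pyGet? pred_doms 0 with
    | none => []            -- unreachable (length = 1)
    | some d =>
      match PySem.Dict.get? (PySem.Dict.mk dom_sizes_map) d with
      | none => []          -- KeyError, excluded by Pre_
      | some s =>
        (PySem.List.pyRange 0 s 1).foldl
          (fun objs i => objs ++ [[d ++ "_" ++ PySem.Int.toStr i]]) []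
  else
    match PySem.List.pyGet? pred_doms 0, PySem.List.pyGet? pred_doms 1 with
    | some d1, some d2 =>
      match PySem.Dict.get? (PySem.Dict.mk dom_sizes_map) d1,
            PySem.Dict.get? (PySem.Dict.mk dom_sizes_map) d2 with
      | some s1, some s2 =>
        (PySem.List.pyRange 0 s1 1).foldl
          (fun objs i =>
            (PySem.List.pyRange 0 s2 1).foldl
              (fun objs j =>
                objs ++ [[d1 ++ "_" ++ PySem.Int.toStr i, d2 ++ "_" ++ PySem.Int.toStr j]])
              objs)
          []
      | _, _ => []          -- KeyError, excluded by Pre_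
    | _, _ => []            -- IndexError, excluded by Pre_

-- ===== PORT B =====
-- rank-indexed enumeration: one flat range over the product size, divmod recovers the pair
def possible_atoms_alt (pred_doms : List String) (dom_sizes_map : List (String × Int)) : List (List String) :=
  match PySem.List.pyGet? pred_doms 0 with
  | none => []              -- IndexError, excluded by Pre_
  | some d =>
    match PySem.Dict.get? (PySem.Dict.mk dom_sizes_map) d with
    | none => []            -- KeyError, excluded by Pre_
    | some s =>
      if pred_doms.length = 1 then
        (PySem.List.pyRange 0 s 1).map (fun k => [d ++ "_" ++ PySem.Int.toStr k])
      else
        match PySem.List.pyGet? pred_doms 1 with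
        | none => []        -- unreachable under Pre_
        | some d2 =>
          match PySem.Dict.get? (PySem.Dict.mk dom_sizes_map) d2 with
          | none => []      -- KeyError, excluded by Pre_
          | some s2 =>
            if s ≤ 0 ∨ s2 ≤ 0 then []
            else
              (PySem.List.pyRange 0 (s * s2) 1).map
                (fun k => [d ++ "_" ++ PySem.Int.toStr (PySem.Int.floordiv k s2),
                           d2 ++ "_" ++ PySem.Int.toStr (PySem.Int.mod k s2)])

-- ===== PRECONDITION & SPEC =====
-- Pre_ excludes exactly the inputs where A raises: empty pred_doms (IndexError) and
-- pred_doms whose first (and, off the one-domain branch, second) domain is not a key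
-- of dom_sizes_map (KeyError).
def Pre_possible_atoms (pred_doms : List String) (dom_sizes_map : List (String × Int)) : Prop :=
  if pred_doms.length = 1 then
    (PySem.Dict.get? (PySem.Dict.mk dom_sizes_map) (pred_doms.getD 0 "")).isSome = true
  else
    2 ≤ pred_doms.length ∧
    (PySem.Dict.get? (PySem.Dict.mk dom_sizes_map) (pred_doms.getD 0 "")).isSome = true ∧
    (PySem.Dict.get? (PySem.Dict.mk dom_sizes_map) (pred_doms.getD 1 "")).isSome = true
instance (pred_doms : List String) (dom_sizes_map : List (String × Int)) : Decidable (Pre_possible_atoms pred_doms dom_sizes_map) := by unfold Pre_possible_atoms; infer_instance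

def pvWitness_possible_atoms : List String × (List (String × Int)) := (["a", "b"], [("a", 2), ("b", 3)])

def Spec_possible_atoms (pred_doms : List String) (dom_sizes_map : List (String × Int)) (out : List (List String)) : Prop := out = possible_atoms_alt pred_doms dom_sizes_map
instance (pred_doms : List String) (dom_sizes_map : List (String × Int)) (out : List (List String)) : Decidable (Spec_possible_atoms pred_doms dom_sizes_map out) := by unfold Spec_possible_atoms; infer_instance

-- ===== CLAIM (what is proved, stated in full; the proofs are below) =====
def Claim_equal_possible_atoms : Prop := ∀ (pred_doms : List String) (dom_sizes_map : List (String × Int)), Dom_possible_atoms pred_doms dom_sizes_map → Pre_possible_atoms pred_doms dom_sizes_map → Spec_possible_atoms pred_doms dom_sizes_map (possible_atoms pred_doms dom_sizes_map)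

-- ===== LEMMAS AND PROOFS =====

theorem pv_witness_ok : Dom_possible_atoms pvWitness_possible_atoms.1 pvWitness_possible_atoms.2 ∧ Pre_possible_atoms pvWitness_possible_atoms.1 pvWitness_possible_atoms.2 := by decide

-- Nat core of the rank/divmod reindexing
theorem pv_range_divmod {α : Type} (g : Nat → Nat → α) (n1 n2 : Nat) :
    (List.range (n1 * n2)).map (fun m => g (m / n2) (m % n2))
      = (List.range n1).flatMap (fun i => (List.range n2).map (fun j => g i j)) := by
  induction n1 with
  | zero => simp
  | succ n ih =>
    have h1 : (n + 1) * n2 = n * n2 + n2 := by ring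
    rw [h1, List.range_add, List.map_append, ih, List.range_succ, List.flatMap_append]
    congr 1
    simp only [List.map_map, List.flatMap_cons, List.flatMap_nil, List.append_nil]
    refine List.map_congr_left ?_
    intro j hj
    have hj' : j < n2 := by simpa using hj
    have hd : (n * n2 + j) / n2 = n := by
      rw [Nat.add_comm, Nat.add_mul_div_right _ _ (by omega : 0 < n2),
          Nat.div_eq_of_lt hj']
      omega
    have hm : (n * n2 + j) % n2 = j := by
      rw [Nat.add_comm, Nat.add_mul_mod_self_right, Nat.mod_eq_of_lt hj']
    simp [hd, hm]

theorem pv_flatten_map_singleton {a b : Type} (g : a → b) (l : List a) :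
    (l.map (fun x => [g x])).flatten = l.map g := by
  induction l <;> simp_all

-- ===== VERDICT (by name: the statement is the Claim_ definition above) =====
theorem possible_atoms_spec : Claim_equal_possible_atoms := by
  intro pred_doms dsm _hDom hPre
  unfold Spec_possible_atoms possible_atoms possible_atoms_alt Pre_possible_atoms at *
  match pred_doms with
  | [] => exact absurd hPre (by simp)
  | [d] =>
    simp only [List.length_cons, List.length_nil, if_pos] at *
    simp only [PySem.List.pyGet?, PySem.List.pyIdx?] at *
    obtain ⟨s, hg⟩ := Option.isSome_iff_exists.mp (by simpa using hPre)
    simp only [List.length_singleton] at hg ⊢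
    simp [hg, pv_flatten_map_singleton]
  | d1 :: d2 :: rest =>
    have hne : (d1 :: d2 :: rest).length ≠ 1 := by simp
    simp only [if_neg hne] at *
    obtain ⟨_, hk1, hk2⟩ := hPre
    obtain ⟨s1, hg1⟩ := Option.isSome_iff_exists.mp (by simpa using hk1)
    obtain ⟨s2, hg2⟩ := Option.isSome_iff_exists.mp (by simpa using hk2)
    have e0 : PySem.List.pyGet? (d1 :: d2 :: rest) 0 = some d1 := by
      simp [PySem.List.pyGet?, PySem.List.pyIdx?,
            show (0:Int) ≤ (rest.length : Int) + 1 by positivity]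
    have e1 : PySem.List.pyGet? (d1 :: d2 :: rest) 1 = some d2 := by
      simp [PySem.List.pyGet?, PySem.List.pyIdx?]
    have inner : ∀ (objs : List (List String)) (i : Int),
        (PySem.List.pyRange 0 s2 1).foldl
          (fun objs j => objs ++ [[d1 ++ "_" ++ PySem.Int.toStr i, d2 ++ "_" ++ PySem.Int.toStr j]]) objs
        = objs ++ (PySem.List.pyRange 0 s2 1).map
            (fun j => [d1 ++ "_" ++ PySem.Int.toStr i, d2 ++ "_" ++ PySem.Int.toStr j]) :=
      fun objs i => PySem.List.foldl_append_singleton_eq_map ..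
    simp only [e0, e1, hg1, hg2, inner, PySem.List.foldl_append_eq_flatMap, List.nil_append]
    rcases le_or_gt s1 0 with h1 | h1
    · rw [if_pos (Or.inl h1), PySem.List.pyRange_one_eq_nil h1]
      simp
    rcases le_or_gt s2 0 with h2 | h2
    · rw [if_pos (Or.inr h2), PySem.List.pyRange_one_eq_nil h2]
      simp
    · rw [if_neg (by omega)]
      obtain ⟨n1, rfl⟩ : ∃ n : Nat, s1 = (n : Int) := ⟨s1.toNat, by omega⟩
      obtain ⟨n2, rfl⟩ : ∃ n : Nat, s2 = (n : Int) := ⟨s2.toNat, by omega⟩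
      have hprod : ((n1 : Int) * (n2 : Int)) = ((n1 * n2 : Nat) : Int) := by push_cast; ring
      rw [hprod, PySem.List.pyRange_zero_natCast, PySem.List.pyRange_zero_natCast,
          PySem.List.pyRange_zero_natCast]
      simp only [List.map_map, List.flatMap_map, Function.comp_def,
                 PySem.Int.floordiv_natCast, PySem.Int.mod_natCast]
      exact (pv_range_divmod
        (fun i j => [d1 ++ "_" ++ PySem.Int.toStr (i : Int), d2 ++ "_" ++ PySem.Int.toStr (j : Int)])
        n1 n2).symm
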